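-- pv_equiv track=rewrite | github.com/giuseppechessa/FaultCo-SimulationDemo | SNNCode/EndToEndInference/PackageGenerator.py | separate_self_communication
-- ===== SOURCE A (Python) =====
-- def separate_self_communication(destination_cores, source_core):
--     """Separate self-communication from inter-core communication"""
--     inter_core_destinations = []
--     has_self_communication = False
--
--     for dest_core in destination_cores:
--         if dest_core == source_core:
--             has_self_communication = True
--         else:
--             inter_core_destinations.append(dest_core)
--
--     return inter_core_destinations, has_self_communication
-- ===== SOURCE B (Python) =====
-- def separate_self_communication(destination_cores, source_core):
--     """Separate self-communication from inter-core communication.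
--
--     Divide and conquer: solve each half of the index range independently,
--     then combine by concatenating the filtered sublists (order preserved)
--     and OR-ing the self-communication flags."""
--     def solve(lo, hi):
--         if hi <= lo:
--             return [], False
--         if hi - lo == 1:
--             d = destination_cores[lo]
--             if d == source_core:
--                 return [], True
--             return [d], False
--         mid = (lo + hi) // 2
--         left, f1 = solve(lo, mid)
--         right, f2 = solve(mid, hi)
--         return left + right, f1 or f2
--
--     return solve(0, len(destination_cores))
-- ===== Notes on version B (the rewrite author's own statement) =====
-- stated objective: alternative
-- what changed: Replaces A's single left-to-right loop accumulating both results with a divide-and-conquer recursion over index ranges: each half is solved independently and results are combined by list concatenation and boolean OR.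
import Mathlib
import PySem

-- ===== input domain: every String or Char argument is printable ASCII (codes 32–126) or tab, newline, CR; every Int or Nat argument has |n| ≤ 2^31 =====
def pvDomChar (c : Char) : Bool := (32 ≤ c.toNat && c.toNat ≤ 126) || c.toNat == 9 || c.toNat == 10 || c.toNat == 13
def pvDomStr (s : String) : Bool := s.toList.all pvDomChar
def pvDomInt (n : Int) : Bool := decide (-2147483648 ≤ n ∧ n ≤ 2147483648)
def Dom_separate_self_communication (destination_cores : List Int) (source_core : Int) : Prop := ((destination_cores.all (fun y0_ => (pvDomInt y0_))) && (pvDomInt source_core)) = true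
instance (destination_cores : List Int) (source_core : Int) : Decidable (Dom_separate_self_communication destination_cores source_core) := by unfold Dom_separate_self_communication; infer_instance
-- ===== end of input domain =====

-- B replaces A's single accumulating loop with a divide-and-conquer recursion over index ranges; objective: alternative.

-- ===== PORT A =====
-- one fold over the list carrying the pair (inter_core_destinations, has_self_communication)
def separate_self_communication (destination_cores : List Int) (source_core : Int) : List Int × Bool :=
  destination_cores.foldl
    (fun st dest_core =>
      if dest_core == source_core then (st.1, true)
      else (st.1 ++ [dest_core], st.2))
    ([], false)

-- ===== PORT B =====
-- solve(lo, hi) of Source B; the index lo in the singleton case is always in range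
-- (lo < hi ≤ length at every call), so List.getD is exact for Python's destination_cores[lo].
def sscSolve (xs : List Int) (s : Int) (lo hi : Nat) : List Int × Bool :=
  if _h : hi ≤ lo then ([], false)
  else if hi - lo = 1 then
    let d := xs.getD lo 0
    if d == s then ([], true) else ([d], false)
  else
    let mid := (lo + hi) / 2
    let l := sscSolve xs s lo mid
    let r := sscSolve xs s mid hi
    (l.1 ++ r.1, l.2 || r.2)
termination_by hi - lo
decreasing_by all_goals omega

def separate_self_communication_alt (destination_cores : List Int) (source_core : Int) : List Int × Bool :=
  sscSolve destination_cores source_core 0 destination_cores.length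

-- ===== PRECONDITION & SPEC =====
def Spec_separate_self_communication (destination_cores : List Int) (source_core : Int) (out : List Int × Bool) : Prop := out = separate_self_communication_alt destination_cores source_core
instance (destination_cores : List Int) (source_core : Int) (out : List Int × Bool) : Decidable (Spec_separate_self_communication destination_cores source_core out) := by unfold Spec_separate_self_communication; infer_instance

-- ===== CLAIM (what is proved, stated in full; the proofs are below) =====
def Claim_equal_separate_self_communication : Prop := ∀ (destination_cores : List Int) (source_core : Int), Dom_separate_self_communication destination_cores source_core → Spec_separate_self_communication destination_cores source_core (separate_self_communication destination_cores source_core)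

-- ===== LEMMAS AND PROOFS =====

-- loop invariant for A: the fold starting from (acc, b) yields (acc ++ filter, b || contains)
theorem ssc_fold_inv (l : List Int) (s : Int) (acc : List Int) (b : Bool) :
    l.foldl (fun st d => if d == s then (st.1, true) else (st.1 ++ [d], st.2)) (acc, b)
      = (acc ++ l.filter (fun d => d != s), b || l.contains s) := by
  induction l generalizing acc b with
  | nil => simp
  | cons x xs ih =>
    by_cases h : x = s
    · rw [List.foldl_cons, if_pos (by simp [h]), ih]
      simp [h]
    · rw [List.foldl_cons, if_neg (by simp [h]), ih]
      simp [h, Ne.symm h]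

-- characterisation of B's divide and conquer on the segment xs[lo:hi]
theorem sscSolve_eq (xs : List Int) (s : Int) :
    ∀ n lo hi, hi - lo = n → hi ≤ xs.length →
      sscSolve xs s lo hi
        = (((xs.drop lo).take (hi - lo)).filter (fun d => d != s),
           ((xs.drop lo).take (hi - lo)).contains s) := by
  intro n
  induction n using Nat.strong_induction_on with
  | _ n ih =>
    intro lo hi hn hlen
    rw [sscSolve]
    by_cases h1 : hi ≤ lo
    · simp [h1, Nat.sub_eq_zero_of_le h1]
    · by_cases h2 : hi - lo = 1
      · have hlo : lo < xs.length := by omega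
        have hdrop : xs.drop lo = xs[lo] :: xs.drop (lo + 1) :=
          List.drop_eq_getElem_cons hlo
        have hseg : List.take 1 (List.drop lo xs) = [xs[lo]] := by
          rw [hdrop, List.take_succ_cons, List.take_zero]
        have hd : xs.getD lo 0 = xs[lo] := List.getD_eq_getElem xs 0 hlo
        simp only [h1, h2, dite_false, hd]
        by_cases h : xs[lo] = s <;> simp [h, hseg, Ne.symm]
      · have hmid1 : lo < (lo + hi) / 2 := by omega
        have hmid2 : (lo + hi) / 2 < hi := by omega
        simp only [h1, h2, dite_false, if_false]
        rw [ih ((lo + hi) / 2 - lo) (by omega) lo ((lo + hi) / 2) rfl (by omega),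
            ih (hi - (lo + hi) / 2) (by omega) ((lo + hi) / 2) hi rfl hlen]
        have hsplit : (xs.drop lo).take (hi - lo)
            = (xs.drop lo).take ((lo + hi) / 2 - lo)
              ++ (xs.drop ((lo + hi) / 2)).take (hi - (lo + hi) / 2) := by
          have hdd : xs.drop ((lo + hi) / 2)
              = (xs.drop lo).drop ((lo + hi) / 2 - lo) := by
            rw [List.drop_drop]; congr 1; omega
          rw [hdd, ← List.take_add]
          congr 1; omega
        rw [hsplit]
        simp

-- ===== VERDICT (by name: the statement is the Claim_ definition above) =====
theorem separate_self_communication_spec : Claim_equal_separate_self_communication := by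
  intro dcs s _
  unfold Spec_separate_self_communication separate_self_communication separate_self_communication_alt
  rw [ssc_fold_inv, sscSolve_eq dcs s dcs.length 0 dcs.length rfl (le_refl _)]
  simp
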